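-- pv_equiv track=rewrite | github.com/samitmohan/Interviews-with-Python | Problems/DP/hatsToPerson.py | numberWays
-- ===== SOURCE A (Python) =====
-- from collections import defaultdict
-- from functools import cache
--
-- def numberWays(hats) -> int:
--     @cache
--     def dp(hat, mask):
--         if mask == done:
--             return 1  # everyone can wear a hat
--         if hat > 40:
--             return 0  # base
--         ans = dp(hat + 1, mask)
--         for person in hats_to_people[hat]:
--             if mask & (1 << person) == 0:
--                 ans = (ans + dp(hat + 1, mask | (1 << person))) % MOD
--         return ans
--
--     hats_to_people = defaultdict(list)
--     for i in range(len(hats)):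
--         for hat in hats[i]:
--             hats_to_people[hat].append(i)
--     n = len(hats)
--     MOD = 10**9 + 7
--     done = 2**n - 1  # combinations
--     return dp(1, 0)
-- ===== SOURCE B (Python) =====
-- MOD = 10**9 + 7
--
--
-- def _relax(g, ps, size):
--     """One DP layer: offer the current hat's wearers to every mask."""
--     def val(m):
--         v = g[m]
--         for p in ps:
--             if m & (1 << p) == 0:
--                 v = (v + g[m | (1 << p)]) % MOD
--         return v
--     return [val(m) for m in range(size)]
--
--
-- def numberWays(hats) -> int:
--     n = len(hats)
--     if n > 40:
--         return 0  # only hats 1..40 exist, so more than 40 people can never all be covered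
--     people = [[] for _ in range(41)]
--     for i, hs in enumerate(hats):
--         for h in hs:
--             if 1 <= h <= 40:
--                 people[h].append(i)
--     size = 1 << n
--     g = [1 if m == size - 1 else 0 for m in range(size)]
--     for hat in range(40, 0, -1):
--         ps = people[hat]
--         if ps:
--             g = _relax(g, ps, size)
--     return g[0]
-- ===== Notes on version B (the rewrite author's own statement) =====
-- stated objective: alternative
-- what changed: Replaces A's @cache top-down recursion over (hat, mask) with an explicit bottom-up DP: a size-2^n array over masks, updated iteratively one layer per hat from 40 down to 1 (layers for hats nobody owns are skipped, and >40 people short-circuits to 0 since only hats 1..40 exist).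
import Mathlib
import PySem

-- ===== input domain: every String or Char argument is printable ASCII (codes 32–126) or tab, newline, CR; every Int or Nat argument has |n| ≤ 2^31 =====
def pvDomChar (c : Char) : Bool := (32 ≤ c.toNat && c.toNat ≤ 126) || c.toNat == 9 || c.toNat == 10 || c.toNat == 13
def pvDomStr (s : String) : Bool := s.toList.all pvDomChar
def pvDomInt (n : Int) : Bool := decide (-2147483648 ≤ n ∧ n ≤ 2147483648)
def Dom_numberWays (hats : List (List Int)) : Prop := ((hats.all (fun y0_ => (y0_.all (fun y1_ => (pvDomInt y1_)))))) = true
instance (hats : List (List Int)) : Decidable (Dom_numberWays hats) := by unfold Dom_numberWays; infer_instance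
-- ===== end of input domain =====

-- B replaces A's @cache top-down recursion over (hat, mask) with an explicit bottom-up
-- layer DP: an array over all masks, updated iteratively once per hat (objective: alternative).

-- ===== PORT A =====
-- hats_to_people: defaultdict(list) built by the double loop
-- 'for i in range(len(hats)): for hat in hats[i]: hats_to_people[hat].append(i)'
-- (ported as a fold over enumerate: the same (i, hats[i]) pairs in the same order;
--  'd[hat].append(i)' is Dict.modify with default []).
def pvBuildA (hats : List (List Int)) : PySem.Dict Int (List Int) :=
  (PySem.List.enumerate hats).foldl
    (fun d q => q.2.foldl (fun d h => d.modify h [] (· ++ [q.1])) d)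
    PySem.Dict.empty

-- dp(hat, mask) of A.  hat, mask and done are Python ints that are provably nonnegative
-- (hat starts at 1 and only grows; masks are built from 0 by or-ing 1<<person, person ≥ 0),
-- so they are represented as Nat, on which &&&, ||| and <<< are Python-exact.
-- The @cache decorator does not change the value of this pure function and is not modeled.
def pvDpA (d : PySem.Dict Int (List Int)) (done : Nat) (hat : Nat) (mask : Nat) : Int :=
  if mask = done then 1                      -- everyone can wear a hat
  else if _h : 40 < hat then 0               -- base
  else
    (d.getD (hat : Int) []).foldl
      (fun ans person =>
        if mask &&& (1 <<< person.toNat) = 0 then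
          PySem.Int.mod (ans + pvDpA d done (hat + 1) (mask ||| (1 <<< person.toNat))) 1000000007
        else ans)
      (pvDpA d done (hat + 1) mask)
termination_by 41 - hat
decreasing_by all_goals omega

def numberWays (hats : List (List Int)) : Int :=
  let hats_to_people := pvBuildA hats
  let n := hats.length
  let done := 2 ^ n - 1
  pvDpA hats_to_people done 1 0

-- ===== PORT B =====
-- _relax(g, ps, size): one DP layer ([val(m) for m in range(size)]); masks are Nat (see above);
-- every index used is < size = len(g), so Python's g[...] is getD _ 0.
def pvRelax (g : List Int) (ps : List Int) (size : Nat) : List Int :=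
  (List.range size).map (fun m =>
    ps.foldl
      (fun v p =>
        if m &&& (1 <<< p.toNat) = 0 then
          PySem.Int.mod (v + g.getD (m ||| (1 <<< p.toNat)) 0) 1000000007
        else v)
      (g.getD m 0))

-- people = [[] for _ in range(41)]; for i, hs in enumerate(hats): for h in hs:
--   if 1 <= h <= 40: people[h].append(i)   (h.toNat is exact: 1 ≤ h there).
def pvPeopleB (hats : List (List Int)) : List (List Int) :=
  (PySem.List.enumerate hats).foldl
    (fun ps q => q.2.foldl
      (fun ps h => if 1 ≤ h ∧ h ≤ 40 then ps.set h.toNat (ps.getD h.toNat [] ++ [q.1]) else ps)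
      ps)
    (List.replicate 41 ([] : List Int))

-- size = 1 << n ≥ 1, so range(size) is List.range size and g[0] is getD 0 0.
-- 'if n > 40: return 0': only hats 1..40 exist, so > 40 people can never all be covered.
def numberWays_alt (hats : List (List Int)) : Int :=
  if 40 < hats.length then 0 else
  let people := pvPeopleB hats
  let size := 1 <<< hats.length
  let g0 := (List.range size).map (fun m => if m = size - 1 then (1 : Int) else 0)
  ((PySem.List.pyRange 40 0 (-1)).foldl
    (fun g hat =>
      let ps := people.getD hat.toNat []      -- hat ∈ [1,40], so toNat is exact
      if ps.isEmpty then g else pvRelax g ps size)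
    g0).getD 0 0

-- ===== PRECONDITION & SPEC =====
def Spec_numberWays (hats : List (List Int)) (out : Int) : Prop := out = numberWays_alt hats
instance (hats : List (List Int)) (out : Int) : Decidable (Spec_numberWays hats out) := by unfold Spec_numberWays; infer_instance

-- ===== CLAIM (what is proved, stated in full; the proofs are below) =====
def Claim_equal_numberWays : Prop := ∀ (hats : List (List Int)), Dom_numberWays hats → Spec_numberWays hats (numberWays hats)

-- ===== LEMMAS AND PROOFS =====

-- The flat list of (hat value, person index) pairs both builds traverse.
def pvPairs (hats : List (List Int)) : List (Int × Int) :=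
  (PySem.List.enumerate hats).flatMap (fun q => q.2.map (fun h => (h, q.1)))

-- People wearing hat value c, in append order.
def pvPeopleAt (hats : List (List Int)) (c : Int) : List Int :=
  ((pvPairs hats).filter (fun p => p.1 == c)).map (·.2)

lemma pvBuildA_getD (hats : List (List Int)) (c : Int) :
    (pvBuildA hats).getD c [] = pvPeopleAt hats c := by
  have hflat : pvBuildA hats
      = (pvPairs hats).foldl (fun d p => d.modify p.1 [] (· ++ [p.2])) PySem.Dict.empty := by
    unfold pvBuildA pvPairs
    rw [List.foldl_flatMap]
    simp [List.foldl_map]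
  rw [hflat, PySem.Dict.getD_foldl_modify_append]
  simp [pvPeopleAt]

lemma pvSetfold_getD (l : List (Int × Int)) (acc : List (List Int)) (hlen : acc.length = 41)
    (c : Int) (hc1 : 1 ≤ c) (hc40 : c ≤ 40) :
    (l.foldl (fun ps p => if 1 ≤ p.1 ∧ p.1 ≤ 40
        then ps.set p.1.toNat (ps.getD p.1.toNat [] ++ [p.2]) else ps) acc).getD c.toNat []
      = acc.getD c.toNat [] ++ (l.filter (fun p => p.1 == c)).map (·.2) := by
  induction l generalizing acc with
  | nil => simp
  | cons p l ih =>
    by_cases hp : 1 ≤ p.1 ∧ p.1 ≤ 40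
    · rw [List.foldl_cons, if_pos hp,
        ih (acc.set p.1.toNat (acc.getD p.1.toNat [] ++ [p.2])) (by simp [hlen])]
      by_cases hpc : p.1 = c
      · subst hpc
        have hidx : p.1.toNat < acc.length := by omega
        simp [List.getD_eq_getElem?_getD, List.getElem?_set_self hidx]
      · have hne : p.1.toNat ≠ c.toNat := by omega
        simp [List.getD_eq_getElem?_getD, List.getElem?_set_ne hne, hpc]
    · have hpc : p.1 ≠ c := by omega
      rw [List.foldl_cons, if_neg hp, ih acc hlen]
      simp [hpc]

lemma pvPeopleB_getD (hats : List (List Int)) (h : Nat) (h1 : 1 ≤ h) (h40 : h ≤ 40) :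
    (pvPeopleB hats).getD h [] = pvPeopleAt hats (h : Int) := by
  have hflat : pvPeopleB hats
      = (pvPairs hats).foldl (fun ps p => if 1 ≤ p.1 ∧ p.1 ≤ 40
          then ps.set p.1.toNat (ps.getD p.1.toNat [] ++ [p.2]) else ps)
          (List.replicate 41 ([] : List Int)) := by
    unfold pvPeopleB pvPairs
    rw [List.foldl_flatMap]
    simp [List.foldl_map]
  have hrep : (List.replicate 41 ([] : List Int)).getD h [] = [] := by
    rw [List.getD_eq_getElem?_getD, List.getElem?_replicate]
    split <;> rfl
  have h2 := pvSetfold_getD (pvPairs hats) (List.replicate 41 ([] : List Int)) (by simp)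
    (h : Int) (by exact_mod_cast h1) (by exact_mod_cast h40)
  rw [Int.toNat_natCast] at h2
  rw [hflat, h2, hrep, List.nil_append]
  rfl

lemma pvMem_peopleAt (hats : List (List Int)) (c : Int) (p : Int)
    (hp : p ∈ pvPeopleAt hats c) : 0 ≤ p ∧ p < hats.length := by
  unfold pvPeopleAt pvPairs at hp
  obtain ⟨pr, hpr, rfl⟩ := List.mem_map.mp hp
  have hpr' := List.mem_of_mem_filter hpr
  obtain ⟨q, hq, hqpr⟩ := List.mem_flatMap.mp hpr'
  obtain ⟨h, _, rfl⟩ := List.mem_map.mp hqpr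
  have h1 : q.1 ∈ (PySem.List.enumerate hats).map (·.1) := List.mem_map_of_mem hq
  rw [PySem.List.map_fst_enumerate] at h1
  obtain ⟨hge, hlt⟩ := PySem.List.mem_pyRange_one.mp h1
  exact ⟨hge, by omega⟩

lemma pvBit_done (n p : Nat) (h : p < n) : (2 ^ n - 1) &&& (1 <<< p) ≠ 0 := by
  simp [Nat.shiftLeft_eq, Nat.and_two_pow, Nat.testBit_two_pow_sub_one, h]

lemma pvOr_lt (m n p : Nat) (h : m < 2 ^ n) (hp : p < n) : m ||| (1 <<< p) < 2 ^ n := by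
  rw [Nat.shiftLeft_eq, one_mul]
  exact Nat.or_lt_two_pow h (Nat.pow_lt_pow_right one_lt_two hp)

lemma pvDpA_done (d : PySem.Dict Int (List Int)) (done hat : Nat) :
    pvDpA d done hat done = 1 := by
  rw [pvDpA]; simp

-- a guarded fold where no guard fires is the identity
lemma pvFoldl_guard_id (ps : List Int) (f : Int → Int → Int) (C : Int → Prop)
    [DecidablePred C] (v : Int) (h : ∀ p ∈ ps, ¬ C p) :
    ps.foldl (fun v p => if C p then f v p else v) v = v := by
  induction ps generalizing v with
  | nil => rfl
  | cons p ps ih => rw [List.foldl_cons, if_neg (h p (by simp))]; exact ih v (fun q hq => h q (by simp [hq]))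

-- one layer of B's loop realises one step of A's recursion
lemma pvStep_inv (hats : List (List Int)) (h : Nat) (h1 : 1 ≤ h) (h40 : h ≤ 40)
    (g : List Int)
    (hInv : ∀ m, m < 2 ^ hats.length → g.getD m 0 = pvDpA (pvBuildA hats) (2 ^ hats.length - 1) (h + 1) m)
    (m : Nat) (hm : m < 2 ^ hats.length) :
    (if ((pvPeopleB hats).getD h []).isEmpty then g
     else pvRelax g ((pvPeopleB hats).getD h []) (1 <<< hats.length)).getD m 0
      = pvDpA (pvBuildA hats) (2 ^ hats.length - 1) h m := by
  set n := hats.length with hn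
  have hps : (pvPeopleB hats).getD h [] = pvPeopleAt hats (h : Int) := pvPeopleB_getD hats h h1 h40
  have hsz : 1 <<< n = 2 ^ n := by rw [Nat.shiftLeft_eq, one_mul]
  have hd : (pvBuildA hats).getD (h : Int) [] = pvPeopleAt hats (h : Int) := pvBuildA_getD hats _
  have hmem : ∀ p ∈ pvPeopleAt hats (h : Int), p.toNat < n := by
    intro p hp
    have := pvMem_peopleAt hats _ p hp
    omega
  by_cases hmd : m = 2 ^ n - 1
  · subst hmd
    rw [pvDpA_done]
    have hbase : g.getD (2 ^ n - 1) 0 = 1 := by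
      rw [hInv _ (by have := Nat.one_le_two_pow (n := n); omega), pvDpA_done]
    by_cases he : ((pvPeopleB hats).getD h []).isEmpty
    · rw [if_pos he]; exact hbase
    · rw [if_neg he]
      unfold pvRelax
      rw [hsz, PySem.List.getD_map_range _ _ _ _ (by have := Nat.one_le_two_pow (n := n); omega)]
      rw [pvFoldl_guard_id _ _ (fun p => (2 ^ n - 1) &&& (1 <<< p.toNat) = 0)]
      · exact hbase
      · intro p hp
        rw [hps] at hp
        exact pvBit_done n p.toNat (hmem p hp)
  · conv_rhs => rw [pvDpA]
    rw [if_neg hmd, dif_neg (show ¬ 40 < h by omega), hd]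
    by_cases he : ((pvPeopleB hats).getD h []).isEmpty
    · rw [if_pos he]
      have hnil : pvPeopleAt hats (h : Int) = [] := by rwa [hps, List.isEmpty_iff] at he
      rw [hnil, List.foldl_nil]
      exact hInv m hm
    · rw [if_neg he]
      unfold pvRelax
      rw [hsz, PySem.List.getD_map_range _ _ _ _ (by omega), hps]
      rw [hInv m hm]
      apply List.foldl_ext
      intro v p hp
      have hlt : m ||| (1 <<< p.toNat) < 2 ^ n := pvOr_lt m n p.toNat hm (hmem p hp)
      rw [hInv _ hlt]

-- folding B's countdown loop from hat k down to 1 turns dp(k+1, ·) into dp(1, ·)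
lemma pvLoop_inv (hats : List (List Int)) : ∀ (k : Nat), k ≤ 40 → ∀ g : List Int,
    (∀ m, m < 2 ^ hats.length → g.getD m 0 = pvDpA (pvBuildA hats) (2 ^ hats.length - 1) (k + 1) m) →
    ∀ m, m < 2 ^ hats.length →
      ((PySem.List.pyRange (k : Int) 0 (-1)).foldl
        (fun g hat =>
          let ps := (pvPeopleB hats).getD hat.toNat []
          if ps.isEmpty then g else pvRelax g ps (1 <<< hats.length)) g).getD m 0
        = pvDpA (pvBuildA hats) (2 ^ hats.length - 1) 1 m := by
  intro k
  induction k with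
  | zero => intro _ g hInv m hm; rw [PySem.List.pyRange_neg_one_eq_nil (by norm_num), List.foldl_nil]; exact hInv m hm
  | succ k ih =>
    intro hk g hInv m hm
    rw [PySem.List.pyRange_neg_one_cons (by push_cast; omega), List.foldl_cons]
    have hcast : ((k + 1 : Nat) : Int) - 1 = (k : Int) := by push_cast; omega
    rw [hcast]
    refine ih (by omega) _ ?_ m hm
    intro m' hm'
    have := pvStep_inv hats (k + 1) (by omega) (by omega) g hInv m' hm'
    simpa using this

-- bounded popcount: how many of the n person bits are set in a mask
def pvPC (n m : Nat) : Nat := (List.range n).countP (fun i => m.testBit i)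

lemma pvPC_done (n : Nat) : pvPC n (2 ^ n - 1) = n := by
  unfold pvPC
  rw [List.countP_eq_length.mpr]
  · simp
  · intro a ha
    simp [Nat.testBit_two_pow_sub_one, List.mem_range.mp ha]

lemma pvPC_zero (n : Nat) : pvPC n 0 = 0 := by
  simp [pvPC, Nat.zero_testBit]

lemma pvCountP_or_le (l : List Nat) (a b : Nat → Bool) :
    l.countP (fun i => a i || b i) ≤ l.countP a + l.countP b := by
  induction l with
  | nil => simp
  | cons x l ih => simp only [List.countP_cons]; cases a x <;> cases b x <;> simp <;> omega

lemma pvPC_or_le (n m p : Nat) : pvPC n (m ||| (1 <<< p)) ≤ pvPC n m + 1 := by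
  rw [Nat.shiftLeft_eq, one_mul]
  have h1 : (List.range n).countP (fun i => (2 ^ p).testBit i) ≤ 1 := by
    have he : (List.range n).countP (fun i => (2 ^ p).testBit i) = (List.range n).count p := by
      rw [List.count]; apply List.countP_congr; intro x _
      rw [Nat.testBit_two_pow]; cases Nat.decEq p x with
      | isTrue h => simp [h]
      | isFalse h => simp [h, Ne.symm h]
    rw [he]
    exact List.nodup_iff_count_le_one.1 List.nodup_range p
  calc pvPC n (m ||| 2 ^ p)
      ≤ pvPC n m + (List.range n).countP (fun i => (2 ^ p).testBit i) := by
        unfold pvPC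
        simpa only [Nat.testBit_or] using pvCountP_or_le (List.range n) (m.testBit ·) ((2 ^ p).testBit ·)
    _ ≤ pvPC n m + 1 := by omega

-- too few hats left to cover the missing people ⇒ A's dp is 0
lemma pvDpA_zero (d : PySem.Dict Int (List Int)) (n : Nat) :
    ∀ (k hat mask : Nat), 41 - hat ≤ k → pvPC n mask + (41 - hat) < n →
      pvDpA d (2 ^ n - 1) hat mask = 0 := by
  intro k
  induction k with
  | zero =>
    intro hat mask hk hlt
    have hne : mask ≠ 2 ^ n - 1 := fun he => by rw [he, pvPC_done] at hlt; omega
    rw [pvDpA, if_neg hne, dif_pos (show 40 < hat by omega)]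
  | succ k ih =>
    intro hat mask hk hlt
    have hne : mask ≠ 2 ^ n - 1 := fun he => by rw [he, pvPC_done] at hlt; omega
    rw [pvDpA, if_neg hne]
    by_cases hh : 40 < hat
    · rw [dif_pos hh]
    · rw [dif_neg hh]
      have hinit := ih (hat + 1) mask (by omega) (by omega)
      have hrec : ∀ p : Int, pvDpA d (2 ^ n - 1) (hat + 1) (mask ||| (1 <<< p.toNat)) = 0 := by
        intro p
        exact ih (hat + 1) _ (by omega) (by have := pvPC_or_le n mask p.toNat; omega)
      rw [hinit]
      generalize (d.getD (hat : Int) []) = l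
      induction l with
      | nil => rfl
      | cons p l ihl =>
        rw [List.foldl_cons]
        split
        · rw [hrec p]
          have : PySem.Int.mod (0 + 0) 1000000007 = 0 := by
            rw [PySem.Int.mod_eq_emod_of_pos (by norm_num)]; simp
          rw [this] at *
          exact ihl
        · exact ihl

-- ===== VERDICT (by name: the statement is the Claim_ definition above) =====
theorem numberWays_spec : Claim_equal_numberWays := by
  intro hats _
  unfold Spec_numberWays numberWays numberWays_alt
  dsimp only
  by_cases hbig : 40 < hats.length
  case pos =>
    rw [if_pos hbig]
    exact pvDpA_zero (pvBuildA hats) hats.length 41 1 0 (by omega)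
      (by rw [pvPC_zero]; omega)
  rw [if_neg hbig]
  have hpos : 0 < 2 ^ hats.length := by positivity
  have hsz : 1 <<< hats.length = 2 ^ hats.length := by rw [Nat.shiftLeft_eq, one_mul]
  have hInv0 : ∀ m, m < 2 ^ hats.length →
      ((List.range (1 <<< hats.length)).map
        (fun m => if m = 1 <<< hats.length - 1 then (1 : Int) else 0)).getD m 0
        = pvDpA (pvBuildA hats) (2 ^ hats.length - 1) 41 m := by
    intro m hm
    rw [hsz, PySem.List.getD_map_range _ _ _ _ hm, pvDpA]
    split_ifs <;> first | rfl | omega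
  have hmain := pvLoop_inv hats 40 (by norm_num) _ hInv0 0 hpos
  have hc : ((40 : Nat) : Int) = (40 : Int) := by norm_num
  rw [hc] at hmain
  exact hmain.symm
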